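-- pv_equiv track=rewrite | github.com/LAIYEN-TING/2026-python | weeks/week-03/solutions/1114405035/uva272.py | process_tex_quotes
-- ===== SOURCE A (Python) =====
-- def process_tex_quotes(input_text: str) -> str:
--     """處理 TeX 引號替換"""
--     result = []
--     quote_count = 0
--
--     for char in input_text:
--         if char == '"':
--             if quote_count % 2 == 0:
--                 result.append('``')
--             else:
--                 result.append("''")
--             quote_count += 1
--         else:
--             result.append(char)
--
--     return ''.join(result)
-- ===== SOURCE B (Python) =====
-- def process_tex_quotes(input_text: str) -> str:
--     parts = input_text.split('"')
--     pieces = [parts[0]]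
--     for k, seg in enumerate(parts[1:]):
--         pieces.append('``' if k % 2 == 0 else "''")
--         pieces.append(seg)
--     return ''.join(pieces)
-- ===== Notes on version B (the rewrite author's own statement) =====
-- stated objective: idiomatic
-- what changed: Replaces the char-by-char parity-counter scan by splitting the string on the quote character and interleaving the resulting segments with alternating opening/closing TeX quote markers keyed by segment-index parity.
import Mathlib
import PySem

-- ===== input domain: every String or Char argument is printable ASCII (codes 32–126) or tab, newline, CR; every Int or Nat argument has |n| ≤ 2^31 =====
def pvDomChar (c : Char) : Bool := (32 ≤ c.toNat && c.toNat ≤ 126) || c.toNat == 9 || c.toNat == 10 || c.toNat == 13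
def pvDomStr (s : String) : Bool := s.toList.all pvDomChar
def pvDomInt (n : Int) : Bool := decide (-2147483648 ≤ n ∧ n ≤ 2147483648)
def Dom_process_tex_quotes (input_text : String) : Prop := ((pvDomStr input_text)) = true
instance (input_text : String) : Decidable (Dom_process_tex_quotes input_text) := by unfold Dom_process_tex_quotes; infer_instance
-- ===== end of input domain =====

-- B replaces A's char-by-char parity-counter scan by split('"') + index-parity interleave (idiomatic decomposition, same cost).

-- ===== PORT A =====
-- literal port of A: scan the chars, appending '``'/'' by quote-count parity, then ''.join
def process_tex_quotes (input_text : String) : String :=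
  let st := input_text.toList.foldl
    (fun (st : List (List Char) × Nat) char =>
      if char = '"' then
        if st.2 % 2 == 0 then (st.1 ++ [['`', '`']], st.2 + 1)
        else (st.1 ++ [['\'', '\'']], st.2 + 1)
      else (st.1 ++ [[char]], st.2))
    ([], 0)
  String.mk (PySem.Chars.join [] st.1)

-- ===== PORT B =====
-- literal port of Source B: parts = split('"'); pieces = [parts[0]] then alternate markers by enumerate index
def process_tex_quotes_alt (input_text : String) : String :=
  let parts := PySem.Chars.splitOn input_text.toList ['"']
  let pieces := (PySem.List.enumerate (PySem.List.slice parts (some 1) none)).foldl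
    (fun acc kv => acc ++ [if kv.1 % 2 == 0 then ['`', '`'] else ['\'', '\''], kv.2])
    [(PySem.List.pyGet? parts 0).getD []]   -- parts[0]; split never returns an empty list, so the index is in range
  String.mk (PySem.Chars.join [] pieces)

-- ===== PRECONDITION & SPEC =====
def Spec_process_tex_quotes (input_text : String) (out : String) : Prop := out = process_tex_quotes_alt input_text
instance (input_text : String) (out : String) : Decidable (Spec_process_tex_quotes input_text out) := by unfold Spec_process_tex_quotes; infer_instance

-- ===== CLAIM (what is proved, stated in full; the proofs are below) =====
def Claim_equal_process_tex_quotes : Prop := ∀ (input_text : String), Dom_process_tex_quotes input_text → Spec_process_tex_quotes input_text (process_tex_quotes input_text)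

-- ===== LEMMAS AND PROOFS =====

-- specification version of splitOn for the single-char separator '"'
def splitQ : List Char → List (List Char)
  | [] => [[]]
  | c :: rest =>
    if c = '"' then [] :: splitQ rest
    else
      match splitQ rest with
      | [] => [[c]]
      | y :: ps => (c :: y) :: ps

lemma splitQ_ne_nil (l : List Char) : splitQ l ≠ [] := by
  cases l with
  | nil => simp [splitQ]
  | cons c rest =>
    simp only [splitQ]
    split_ifs
    · simp
    · cases h : splitQ rest <;> simp

-- prepend a prefix onto the head segment (or make it the only segment)
def mapHd (pre : List Char) : List (List Char) → List (List Char)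
  | [] => [pre]
  | y :: ps => (pre ++ y) :: ps

lemma splitOn_go_eq : ∀ (fuel : Nat) (l cur : List Char) (acc : List (List Char)),
    l.length ≤ fuel →
    PySem.Chars.splitOn.go ['"'] fuel l cur acc = acc.reverse ++ mapHd cur.reverse (splitQ l) := by
  intro fuel
  induction fuel with
  | zero =>
    intro l cur acc h
    interval_cases hl : l.length
    have : l = [] := List.length_eq_zero_iff.mp hl
    subst this
    simp [PySem.Chars.splitOn.go, splitQ, mapHd]
  | succ n ih =>
    intro l cur acc h
    cases l with
    | nil => simp [PySem.Chars.splitOn.go, splitQ, mapHd]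
    | cons c rest =>
      by_cases hc : c = '"'
      · subst hc
        have hpre : List.isPrefixOf ['"'] ('"' :: rest) = true := by
          simp [List.isPrefixOf]
        rw [PySem.Chars.splitOn.go]
        simp only [hpre, if_pos, List.length_cons, List.length_nil, List.drop_succ_cons, List.drop_zero]
        rw [ih rest [] (cur.reverse :: acc) (by simp at h ⊢; omega)]
        simp only [splitQ]
        cases hs : splitQ rest with
        | nil => exact absurd hs (splitQ_ne_nil rest)
        | cons y ps => simp [mapHd]
      · have hpre : List.isPrefixOf ['"'] (c :: rest) = false := by
          simp [List.isPrefixOf]; exact fun h' => hc h'.symm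
        rw [PySem.Chars.splitOn.go]
        simp only [hpre]
        rw [if_neg (by simp)]
        rw [ih rest (c :: cur) acc (by simp at h ⊢; omega)]
        simp only [splitQ, if_neg hc]
        cases hs : splitQ rest with
        | nil => exact absurd hs (splitQ_ne_nil rest)
        | cons y ps => simp [mapHd]

lemma splitOn_eq_splitQ (l : List Char) : PySem.Chars.splitOn l ['"'] = splitQ l := by
  unfold PySem.Chars.splitOn
  rw [splitOn_go_eq (l.length + 1) l [] [] (by omega)]
  cases hs : splitQ l with
  | nil => exact absurd hs (splitQ_ne_nil l)
  | cons y ps => simp [mapHd]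

def rep (p : Nat) : List Char := if p % 2 = 0 then ['`', '`'] else ['\'', '\'']

-- the flattened output of A's scan, starting at quote count p
def aflat (p : Nat) : List Char → List Char
  | [] => []
  | c :: cs => if c = '"' then rep p ++ aflat (p + 1) cs else c :: aflat p cs

lemma join_nil_eq_flatten (l : List (List Char)) : PySem.Chars.join [] l = l.flatten := by
  induction l with
  | nil => simp [PySem.Chars.join, List.intercalate]
  | cons x xs ih =>
    cases xs with
    | nil => simp [PySem.Chars.join, List.intercalate]
    | cons y ys =>
      simp only [PySem.Chars.join, List.intercalate, List.intersperse] at *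
      simp_all

-- A's foldl, flattened
lemma foldA (cs : List Char) : ∀ (acc : List (List Char)) (p : Nat),
    (cs.foldl (fun (st : List (List Char) × Nat) char =>
      if char = '"' then
        if st.2 % 2 == 0 then (st.1 ++ [['`', '`']], st.2 + 1)
        else (st.1 ++ [['\'', '\'']], st.2 + 1)
      else (st.1 ++ [[char]], st.2)) (acc, p)).1.flatten = acc.flatten ++ aflat p cs := by
  induction cs with
  | nil => intro acc p; simp [aflat]
  | cons c rest ih =>
    intro acc p
    rw [List.foldl_cons]
    by_cases hc : c = '"'
    · subst hc
      rw [if_pos rfl]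
      by_cases hp : p % 2 = 0
      · rw [if_pos (by simp [hp]), ih]
        simp [aflat, rep, hp]
      · rw [if_neg (by simp [hp]), ih]
        simp [aflat, rep, hp]
    · rw [if_neg hc, ih]
      simp [aflat, hc]

-- the flattened tail of B's pieces, with enumerate starting at k
def bflat (k : Int) : List (List Char) → List Char
  | [] => []
  | y :: ys => (if k % 2 = 0 then ['`', '`'] else ['\'', '\'']) ++ y ++ bflat (k + 1) ys

lemma foldB (ys : List (List Char)) : ∀ (k : Int) (acc : List (List Char)),
    ((PySem.List.enumerate ys k).foldl
      (fun acc kv => acc ++ [if kv.1 % 2 == 0 then ['`', '`'] else ['\'', '\''], kv.2]) acc).flatten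
    = acc.flatten ++ bflat k ys := by
  induction ys with
  | nil => intro k acc; simp [PySem.List.enumerate, bflat]
  | cons y ys ih =>
    intro k acc
    simp only [PySem.List.enumerate, List.foldl_cons]
    rw [ih]
    by_cases hk : k % 2 = 0 <;> simp [bflat, hk]

lemma rep_cast (p : Nat) : (if (p : Int) % 2 = 0 then ['`', '`'] else ['\'', '\'']) = rep p := by
  by_cases hp : p % 2 = 0 <;> simp [rep, hp] <;> omega

-- main identity: head ++ interleaved tail of splitQ = A's flattened scan
lemma main_identity (cs : List Char) : ∀ (p : Nat),
    (splitQ cs).headI ++ bflat (p : Int) (splitQ cs).tail = aflat p cs := by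
  induction cs with
  | nil => intro p; simp [splitQ, bflat, aflat]
  | cons c rest ih =>
    intro p
    by_cases hc : c = '"'
    · subst hc
      have hsp : splitQ ('"' :: rest) = [] :: splitQ rest := by simp [splitQ]
      cases hs : splitQ rest with
      | nil => exact absurd hs (splitQ_ne_nil rest)
      | cons y ps =>
        have hih := ih (p + 1)
        rw [hs] at hih
        rw [hsp, hs]
        have ha : aflat p ('"' :: rest) = rep p ++ aflat (p + 1) rest := by simp [aflat]
        rw [ha]
        simp only [List.headI, List.tail_cons, List.nil_append, bflat]
        rw [rep_cast p]
        have hcast : ((p : Int) + 1) = ((p + 1 : Nat) : Int) := by push_cast; ring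
        rw [hcast, List.append_assoc]
        simp only [List.headI, List.tail_cons] at hih
        rw [hih]
    · have hsp : splitQ (c :: rest) = (c :: (splitQ rest).headI) :: (splitQ rest).tail := by
        simp only [splitQ, if_neg hc]
        cases hs : splitQ rest with
        | nil => exact absurd hs (splitQ_ne_nil rest)
        | cons y ps => simp [List.headI]
      cases hs : splitQ rest with
      | nil => exact absurd hs (splitQ_ne_nil rest)
      | cons y ps =>
        have hih := ih p
        rw [hs] at hih
        rw [hsp, hs]
        have ha : aflat p (c :: rest) = c :: aflat p rest := by simp [aflat, hc]
        rw [ha]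
        simp only [List.headI, List.tail_cons, List.cons_append] at hih ⊢
        rw [hih]

-- ===== VERDICT (by name: the statement is the Claim_ definition above) =====
theorem process_tex_quotes_spec : Claim_equal_process_tex_quotes := by
  intro input_text _
  unfold Spec_process_tex_quotes process_tex_quotes process_tex_quotes_alt
  simp only []
  rw [join_nil_eq_flatten, join_nil_eq_flatten, splitOn_eq_splitQ]
  congr 1
  rw [foldA input_text.toList [] 0]
  rw [PySem.List.slice_from _ (by norm_num)]
  rw [foldB]
  have hhd : ((PySem.List.pyGet? (splitQ input_text.toList) 0).getD []) = (splitQ input_text.toList).headI := by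
    cases hs : splitQ input_text.toList with
    | nil => exact absurd hs (splitQ_ne_nil _)
    | cons y ps => simp [PySem.List.pyGet?, PySem.List.pyIdx?, List.headI]
  have htl : (List.drop (Int.toNat 1) (splitQ input_text.toList)) = (splitQ input_text.toList).tail := by
    simp [List.drop_one]
  rw [hhd, htl]
  simpa using (main_identity input_text.toList 0).symm
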